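-- pv_equiv track=rewrite | github.com/scandelmo-paralex/fddadvisor-platform | scripts/sync_data_v7.py | map_uuids
-- ===== SOURCE A (Python) =====
-- def map_uuids(rows, uuid_mapping, fields):
--     """Replace production UUIDs with staging UUIDs in specified fields"""
--     mapped = []
--     for row in rows:
--         new_row = row.copy()
--         for field in fields:
--             if field in new_row and new_row[field]:
--                 old_id = new_row[field]
--                 if old_id in uuid_mapping:
--                     new_row[field] = uuid_mapping[old_id]
--         mapped.append(new_row)
--     return mapped
-- ===== SOURCE B (Python) =====
-- def map_uuids(rows, uuid_mapping, fields):
--     """Replace production UUIDs with staging UUIDs in specified fields"""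
--     fieldset = set(fields)
--     return [
--         {k: (uuid_mapping[v] if (k in fieldset and v and v in uuid_mapping) else v)
--          for k, v in row.items()}
--         for row in rows
--     ]
-- ===== Notes on version B (the rewrite author's own statement) =====
-- stated objective: faster
-- what changed: B inverts the traversal: instead of looping over all fields per row on a copied dict, it builds each output row in one dict comprehension over the row's own items, checking key membership in a set built once from fields (O(rows*fields) -> O(total items + fields)).
-- outside the precondition, e.g. on map_uuids([{'a': 'x'}], {'x': 'y', 'y': 'z'}, ['a', 'a']): A returns [{'a': 'z'}], B returns [{'a': 'y'}]
import Mathlib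
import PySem

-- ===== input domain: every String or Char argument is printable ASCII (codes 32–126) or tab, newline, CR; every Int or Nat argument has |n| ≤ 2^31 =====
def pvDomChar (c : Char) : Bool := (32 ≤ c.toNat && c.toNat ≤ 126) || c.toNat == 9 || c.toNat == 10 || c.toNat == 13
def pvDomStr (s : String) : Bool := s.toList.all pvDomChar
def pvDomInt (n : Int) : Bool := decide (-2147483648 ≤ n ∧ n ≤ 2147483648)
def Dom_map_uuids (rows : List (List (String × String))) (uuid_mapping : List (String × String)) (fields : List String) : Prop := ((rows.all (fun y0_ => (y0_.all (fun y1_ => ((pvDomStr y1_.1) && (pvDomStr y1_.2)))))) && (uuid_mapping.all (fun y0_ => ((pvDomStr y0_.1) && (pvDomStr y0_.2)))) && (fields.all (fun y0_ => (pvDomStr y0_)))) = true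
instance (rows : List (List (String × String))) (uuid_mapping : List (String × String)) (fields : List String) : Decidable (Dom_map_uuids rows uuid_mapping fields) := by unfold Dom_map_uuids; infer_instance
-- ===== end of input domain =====

-- B replaces A's loop over `fields` mutating a copied dict by a single dict comprehension
-- over each row's own items, testing key membership in a set built once from `fields` (measured faster when fields is large).

-- ===== PORT A =====
-- the body of A's inner `for field in fields` loop (one step of the loop, named)
def pvStep (um : PySem.Dict String String) (nr : PySem.Dict String String) (field : String) : PySem.Dict String String :=
  match nr.get? field with
  | some v =>
    if v ≠ "" then
      match um.get? v with
      | some nv => nr.insert field nv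
      | none => nr
    else nr
  | none => nr

def map_uuids (rows : List (List (String × String))) (uuid_mapping : List (String × String)) (fields : List String) : List (List (String × String)) :=
  let um : PySem.Dict String String := PySem.Dict.mk uuid_mapping
  (rows.foldl (fun (mapped : List (List (String × String))) row =>
    let new_row : PySem.Dict String String :=
      fields.foldl (pvStep um) (PySem.Dict.mk row)
    mapped ++ [new_row.items]) [])

-- ===== PORT B =====
-- the dict comprehension over row.items() builds, for a Python dict (unique keys), exactly
-- the item-by-item image: List.map over the row's items
def map_uuids_alt (rows : List (List (String × String))) (uuid_mapping : List (String × String)) (fields : List String) : List (List (String × String)) :=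
  let fieldset : PySem.Set String := PySem.Set.ofList fields
  rows.map (fun row => row.map (fun kv =>
    if fieldset.contains kv.1 && kv.2 ≠ "" then
      match (PySem.Dict.mk uuid_mapping).get? kv.2 with
      | some nv => (kv.1, nv)
      | none => kv
    else kv))

-- ===== PRECONDITION & SPEC =====
-- Pre_ excludes rows whose association lists carry duplicate keys (not representable as a
-- Python dict), and the degenerate combination of a duplicated entry in `fields` with a
-- mapping value that is itself a truthy mapping key, where A may re-read an already-replaced
-- value and chain replacements — a corner on which either behaviour is defensible.
def Pre_map_uuids (rows : List (List (String × String))) (uuid_mapping : List (String × String)) (fields : List String) : Prop :=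
  (∀ row ∈ rows, (row.map Prod.fst).Nodup) ∧
  (fields.Nodup ∨ ∀ p ∈ uuid_mapping, p.2 = "" ∨ p.2 ∉ uuid_mapping.map Prod.fst)
instance (rows : List (List (String × String))) (uuid_mapping : List (String × String)) (fields : List String) : Decidable (Pre_map_uuids rows uuid_mapping fields) := by unfold Pre_map_uuids; infer_instance
def pvWitness_map_uuids : (List (List (String × String))) × (List (String × String)) × List String :=
  ([[("id", "u1"), ("name", "bob")], [("id", ""), ("name", "eve")]], [("u1", "s1")], ["id", "owner"])
def Spec_map_uuids (rows : List (List (String × String))) (uuid_mapping : List (String × String)) (fields : List String) (out : List (List (String × String))) : Prop := out = map_uuids_alt rows uuid_mapping fields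
instance (rows : List (List (String × String))) (uuid_mapping : List (String × String)) (fields : List String) (out : List (List (String × String))) : Decidable (Spec_map_uuids rows uuid_mapping fields out) := by unfold Spec_map_uuids; infer_instance

-- ===== CLAIM (what is proved, stated in full; the proofs are below) =====
def Claim_equal_map_uuids : Prop := ∀ (rows : List (List (String × String))) (uuid_mapping : List (String × String)) (fields : List String), Dom_map_uuids rows uuid_mapping fields → Pre_map_uuids rows uuid_mapping fields → Spec_map_uuids rows uuid_mapping fields (map_uuids rows uuid_mapping fields)

-- ===== LEMMAS AND PROOFS =====

-- the per-item transformation B applies, with list membership in place of the set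
def pvG (um : PySem.Dict String String) (fields : List String) (kv : String × String) : String × String :=
  if kv.1 ∈ fields ∧ kv.2 ≠ "" then
    match um.get? kv.2 with
    | some nv => (kv.1, nv)
    | none => kv
  else kv

lemma pvStep_keys (um nr : PySem.Dict String String) (f : String) : (pvStep um nr f).keys = nr.keys := by
  unfold pvStep
  cases h : nr.get? f with
  | none => rfl
  | some v =>
    by_cases hv : v = ""
    · simp [hv]
    · simp only [hv, if_pos, ne_eq, not_false_iff]
      cases hu : um.get? v with
      | none => rfl
      | some nv =>
        simp only []
        exact PySem.Dict.keys_insert_of_contains nr nv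
          (by rw [PySem.Dict.contains_eq_isSome_get?, h]; rfl)

lemma pvVal_of_mem (nr : PySem.Dict String String) (hnd : nr.keys.Nodup)
    {kv : String × String} (hkv : kv ∈ nr.items) {v : String} (h : nr.get? kv.1 = some v) :
    kv.2 = v := by
  have := PySem.Dict.get?_of_mem_items nr (k := kv.1) (v := kv.2) (by simpa using hkv) hnd
  rw [this] at h; exact (Option.some.injEq _ _).mp h

lemma pvNotMem_key (nr : PySem.Dict String String)
    {kv : String × String} (hkv : kv ∈ nr.items) {f : String} (h : nr.get? f = none) :
    kv.1 ≠ f := by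
  intro hf
  have : kv.1 ∈ nr.keys := PySem.Dict.mem_keys_of_mem_items nr hkv
  rw [hf] at this
  rw [PySem.Dict.get?_eq_none_iff_not_mem_keys nr f] at h
  exact h this

-- either the fields are distinct, or no mapping value is itself a truthy mapping key
def pvSafe (um : PySem.Dict String String) (fields : List String) : Prop :=
  fields.Nodup ∨ ∀ v nv, um.get? v = some nv → nv = "" ∨ um.get? nv = none

lemma pvFold_items (um : PySem.Dict String String) (fields : List String)
    (nr : PySem.Dict String String) (hf : pvSafe um fields) (hnd : nr.keys.Nodup) :
    (fields.foldl (pvStep um) nr).items = nr.items.map (pvG um fields) := by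
  induction fields generalizing nr with
  | nil =>
    rw [List.map_congr_left (fun kv _ => by simp [pvG] : ∀ kv ∈ nr.items, pvG um [] kv = id kv)]
    simp
  | cons f fs ih =>
    have hfs : pvSafe um fs := by
      cases hf with
      | inl hnodup => exact Or.inl (List.nodup_cons.mp hnodup).2
      | inr hnc => exact Or.inr hnc
    have hnd' : (pvStep um nr f).keys.Nodup := by rw [pvStep_keys]; exact hnd
    have step : List.foldl (pvStep um) nr (f :: fs) = fs.foldl (pvStep um) (pvStep um nr f) := rfl
    rw [step, ih (pvStep um nr f) hfs hnd']
    -- now show (pvStep um nr f).items.map (pvG um fs) = nr.items.map (pvG um (f :: fs))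
    unfold pvStep
    cases h : nr.get? f with
    | none =>
      apply List.map_congr_left
      intro kv hkv
      have hne : kv.1 ≠ f := pvNotMem_key nr hkv h
      simp [pvG, hne]
    | some v =>
      by_cases hv : v = ""
      · simp only [hv, ne_eq, not_true_eq_false, if_false]
        apply List.map_congr_left
        intro kv hkv
        by_cases hk : kv.1 = f
        · have : kv.2 = v := pvVal_of_mem nr hnd hkv (hk ▸ h)
          simp [pvG, this, hv]
        · simp [pvG, hk]
      · simp only [ne_eq, hv, not_false_iff, if_true]
        cases hu : um.get? v with
        | none =>
          simp only []
          apply List.map_congr_left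
          intro kv hkv
          by_cases hk : kv.1 = f
          · have hvv : kv.2 = v := pvVal_of_mem nr hnd hkv (hk ▸ h)
            by_cases hin : f ∈ fs <;> simp [pvG, hk, hin, hvv, hv, hu]
          · simp [pvG, hk]
        | some nv =>
          simp only []
          rw [PySem.Dict.items_insert_of_contains nr nv
            (by rw [PySem.Dict.contains_eq_isSome_get?, h]; rfl)]
          rw [List.map_map]
          apply List.map_congr_left
          intro kv hkv
          by_cases hk : kv.1 = f
          · have hvv : kv.2 = v := pvVal_of_mem nr hnd hkv (hk ▸ h)
            have hsafe : f ∉ fs ∨ nv = "" ∨ um.get? nv = none := by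
              cases hf with
              | inl hnodup => exact Or.inl (List.nodup_cons.mp hnodup).1
              | inr hnc => exact Or.inr (hnc v nv hu)
            rcases hsafe with hfin | hnv | hnone
            · simp [Function.comp, pvG, hk, hfin, hvv, hv, hu]
            · by_cases hin : f ∈ fs <;>
                simp [Function.comp, pvG, hk, hin, hvv, hv, hu, hnv]
            · by_cases hin : f ∈ fs <;>
                simp [Function.comp, pvG, hk, hin, hvv, hv, hu, hnone]
          · simp [Function.comp, pvG, hk]

lemma pvFoldAppend {α β : Type} (l : List α) (h : α → β) (acc : List β) :
    l.foldl (fun a x => a ++ [h x]) acc = acc ++ l.map h := by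
  induction l generalizing acc with
  | nil => simp
  | cons x xs ih => simp [List.foldl_cons, ih]

-- ===== VERDICT (by name: the statement is the Claim_ definition above) =====
theorem map_uuids_spec : Claim_equal_map_uuids := by
  intro rows uuid_mapping fields _ hpre
  unfold Spec_map_uuids map_uuids map_uuids_alt
  simp only []
  rw [pvFoldAppend rows (fun row => (fields.foldl (pvStep (PySem.Dict.mk uuid_mapping)) (PySem.Dict.mk row)).items) []]
  simp only [List.nil_append]
  apply List.map_congr_left
  intro row hrow
  have hsafe : pvSafe (PySem.Dict.mk uuid_mapping) fields := by
    cases hpre.2 with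
    | inl h => exact Or.inl h
    | inr h =>
      refine Or.inr (fun v nv hg => ?_)
      have hmem : (v, nv) ∈ uuid_mapping := by
        simpa using PySem.Dict.mem_items_of_get?_eq_some (d := PySem.Dict.mk uuid_mapping) hg
      rcases h (v, nv) hmem with h1 | h2
      · exact Or.inl h1
      · refine Or.inr ?_
        rw [PySem.Dict.get?_eq_none_iff_not_mem_keys]
        simpa [PySem.Dict.keys] using h2
  rw [pvFold_items (PySem.Dict.mk uuid_mapping) fields (PySem.Dict.mk row) hsafe
    (by simpa [PySem.Dict.keys] using hpre.1 row hrow)]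
  apply List.map_congr_left
  intro kv _
  unfold pvG
  by_cases hmem : kv.1 ∈ fields <;> by_cases hv : kv.2 = "" <;>
    simp [PySem.Set.mem_ofList, hmem, hv]
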